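-- pv_equiv track=rewrite | github.com/Abieskawa/GenomeExploreTools | snpeffvariantclassify.py | classify_annotations_by_impact
-- ===== SOURCE A (Python) =====
-- def classify_annotations_by_impact(annotations):
--     impact_categories = {
--         'HIGH': [],
--         'MODERATE': [],
--         'LOW': [],
--         'MODIFIER': []
--     }
--
--     for annotation in annotations:
--         impact = annotation['impact']
--         if impact in impact_categories:
--             impact_categories[impact].append(annotation['annotation'])
--
--     return impact_categories
-- ===== SOURCE B (Python) =====
-- def classify_annotations_by_impact(annotations):
--     return {cat: [a['annotation'] for a in annotations if a['impact'] == cat]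
--             for cat in ('HIGH', 'MODERATE', 'LOW', 'MODIFIER')}
-- ===== Notes on version B (the rewrite author's own statement) =====
-- stated objective: idiomatic
-- what changed: Replaces the single bucketing loop that mutates a pre-built dict (with a membership test and append per item) by a dict comprehension that builds each category's list by filtering the annotations once per category.
import Mathlib
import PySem

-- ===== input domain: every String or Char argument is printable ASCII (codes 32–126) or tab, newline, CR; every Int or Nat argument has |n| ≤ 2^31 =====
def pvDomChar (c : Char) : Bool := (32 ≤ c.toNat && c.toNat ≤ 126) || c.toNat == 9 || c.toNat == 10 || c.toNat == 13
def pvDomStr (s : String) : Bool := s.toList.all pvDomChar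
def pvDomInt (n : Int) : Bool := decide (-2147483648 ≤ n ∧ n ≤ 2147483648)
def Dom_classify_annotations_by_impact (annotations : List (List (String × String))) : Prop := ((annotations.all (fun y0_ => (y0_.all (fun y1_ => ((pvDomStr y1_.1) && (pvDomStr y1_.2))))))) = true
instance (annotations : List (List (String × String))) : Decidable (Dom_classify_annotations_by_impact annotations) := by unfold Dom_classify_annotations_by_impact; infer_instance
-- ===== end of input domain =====

-- B replaces A's single bucketing loop over a mutable dict by a dict comprehension filtering the
-- annotations once per fixed category (idiomatic; return value only — neither version mutates its argument).

-- ===== PORT A =====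
-- loop body: impact = annotation['impact']; if impact in impact_categories: impact_categories[impact].append(annotation['annotation'])
-- (annotation['impact'] / ['annotation'] raise KeyError when absent: Pre_ excludes that, the port reads them with getD "")
def pvGoA (d : PySem.Dict String (List String)) (ann : List (String × String)) :
    PySem.Dict String (List String) :=
  let impact := (PySem.Dict.mk ann).getD "impact" ""
  if d.contains impact then
    d.modify impact [] (fun ls => ls ++ [(PySem.Dict.mk ann).getD "annotation" ""])
  else d

def classify_annotations_by_impact (annotations : List (List (String × String))) :
    List (String × List String) :=
  (annotations.foldl pvGoA
    (PySem.Dict.mk [("HIGH", []), ("MODERATE", []), ("LOW", []), ("MODIFIER", [])])).items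

-- ===== PORT B =====
-- [a['annotation'] for a in annotations if a['impact'] == cat]
def pvBucket (cat : String) (annotations : List (List (String × String))) : List String :=
  (annotations.filter (fun a => (PySem.Dict.mk a).getD "impact" "" == cat)).map
    (fun a => (PySem.Dict.mk a).getD "annotation" "")

def classify_annotations_by_impact_alt (annotations : List (List (String × String))) :
    List (String × List String) :=
  ["HIGH", "MODERATE", "LOW", "MODIFIER"].map (fun cat => (cat, pvBucket cat annotations))

-- ===== PRECONDITION & SPEC =====
-- Pre_ excludes exactly the inputs where Python A raises KeyError: an annotation without an
-- 'impact' key, or one whose impact is a category but which lacks an 'annotation' key.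
def Pre_classify_annotations_by_impact (annotations : List (List (String × String))) : Prop :=
  ∀ ann ∈ annotations,
    ((PySem.Dict.mk ann).get? "impact").isSome = true ∧
    ((PySem.Dict.mk ann).getD "impact" "" ∈ (["HIGH", "MODERATE", "LOW", "MODIFIER"] : List String) →
      ((PySem.Dict.mk ann).get? "annotation").isSome = true)
instance (annotations : List (List (String × String))) : Decidable (Pre_classify_annotations_by_impact annotations) := by unfold Pre_classify_annotations_by_impact; infer_instance

def pvWitness_classify_annotations_by_impact : (List (List (String × String))) :=
  [[("impact", "HIGH"), ("annotation", "stop_gained")], [("impact", "intergenic")]]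

def Spec_classify_annotations_by_impact (annotations : List (List (String × String))) (out : List (String × List String)) : Prop := out = classify_annotations_by_impact_alt annotations
instance (annotations : List (List (String × String))) (out : List (String × List String)) : Decidable (Spec_classify_annotations_by_impact annotations out) := by unfold Spec_classify_annotations_by_impact; infer_instance

-- ===== CLAIM (what is proved, stated in full; the proofs are below) =====
def Claim_equal_classify_annotations_by_impact : Prop := ∀ (annotations : List (List (String × String))), Dom_classify_annotations_by_impact annotations → Pre_classify_annotations_by_impact annotations → Spec_classify_annotations_by_impact annotations (classify_annotations_by_impact annotations)

-- ===== LEMMAS AND PROOFS =====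

-- loop invariant: folding A's body over `anns` starting from the literal four-key dict appends
-- to each entry exactly the bucket B computes for that key
lemma pvFoldl_goA_items (anns : List (List (String × String))) (h m l md : List String) :
    (anns.foldl pvGoA (PySem.Dict.mk
        [("HIGH", h), ("MODERATE", m), ("LOW", l), ("MODIFIER", md)])).items =
      [("HIGH", h ++ pvBucket "HIGH" anns), ("MODERATE", m ++ pvBucket "MODERATE" anns),
       ("LOW", l ++ pvBucket "LOW" anns), ("MODIFIER", md ++ pvBucket "MODIFIER" anns)] := by
  induction anns generalizing h m l md with
  | nil => simp [pvBucket]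
  | cons ann rest ih =>
    have hb : ∀ cat : String, pvBucket cat (ann :: rest) =
        (if ((PySem.Dict.mk ann).getD "impact" "" == cat)
          then [(PySem.Dict.mk ann).getD "annotation" ""] else []) ++ pvBucket cat rest := by
      intro cat
      simp only [pvBucket, List.filter_cons]
      split <;> simp_all [pvBucket]
    rw [List.foldl_cons]
    simp only [hb, pvGoA]
    generalize (PySem.Dict.mk ann).getD "annotation" "" = a
    generalize hx : (PySem.Dict.mk ann).getD "impact" "" = x
    by_cases h1 : x = "HIGH"
    · subst h1
      simp [PySem.Dict.contains, PySem.Dict.modify, PySem.Dict.insert, PySem.Dict.getD,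
            PySem.Dict.get?, ih]
    · by_cases h2 : x = "MODERATE"
      · subst h2
        simp [PySem.Dict.contains, PySem.Dict.modify, PySem.Dict.insert, PySem.Dict.getD,
              PySem.Dict.get?, ih]
      · by_cases h3 : x = "LOW"
        · subst h3
          simp [PySem.Dict.contains, PySem.Dict.modify, PySem.Dict.insert, PySem.Dict.getD,
                PySem.Dict.get?, ih]
        · by_cases h4 : x = "MODIFIER"
          · subst h4
            simp [PySem.Dict.contains, PySem.Dict.modify, PySem.Dict.insert, PySem.Dict.getD,
                  PySem.Dict.get?, ih]
          · have h1' : ¬("HIGH" = x) := fun e => h1 e.symm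
            have h2' : ¬("MODERATE" = x) := fun e => h2 e.symm
            have h3' : ¬("LOW" = x) := fun e => h3 e.symm
            have h4' : ¬("MODIFIER" = x) := fun e => h4 e.symm
            simp [PySem.Dict.contains, h1, h2, h3, h4, h1', h2', h3', h4', ih]

-- ===== VERDICT (by name: the statement is the Claim_ definition above) =====
theorem classify_annotations_by_impact_spec : Claim_equal_classify_annotations_by_impact := by
  intro anns _ _
  unfold Spec_classify_annotations_by_impact
  simp [classify_annotations_by_impact, classify_annotations_by_impact_alt, pvFoldl_goA_items]
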